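-- pv_equiv track=rewrite | github.com/yakimka/advent_of_code_2023 | day13/part1.py | compute
-- ===== SOURCE A (Python) =====
-- from itertools import chain
--
-- def compute(s: str) -> int:
--     pattern = []
--     result = 0
--     for line in chain(s.splitlines(), [""]):
--         if not line:
--             if pattern:
--                 if (line := search_horizontal_reflection_line(pattern)) is not None:
--                     result += line * 100
--                 elif (
--                     line := search_horizontal_reflection_line(
--                         flip_matrix_by_90(pattern)
--                     )
--                 ) is not None:
--                     result += line
--             pattern = []
--             continue
--         pattern.append(list(line))
--
--     return result
--
-- def flip_matrix_by_90(matrix):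
--     return [list(reversed(row)) for row in zip(*matrix)]
--
-- def search_horizontal_reflection_line(pattern) -> int | None:
--     for i in range(0, len(pattern) - 1):
--         if check_horizontal_symmetry(pattern, i):
--             return i + 1
--
--     return None
--
-- def check_horizontal_symmetry(pattern, i) -> bool:
--     for i, j in zip(range(i, -1, -1), range(i + 1, len(pattern))):
--         if pattern[i] != pattern[j]:
--             return False
--
--     return True
-- ===== SOURCE B (Python) =====
-- from itertools import groupby
--
--
-- def compute(s: str) -> int:
--     total = 0
--     for nonempty, grp in groupby(s.splitlines(), key=bool):
--         if not nonempty: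
--             continue
--         rows = list(grp)
--         h = _mirror(_ids(rows))
--         total += 100 * h if h else _mirror(_ids(list(zip(*rows))))
--     return total
--
--
-- def _ids(items):
--     # intern: map each element to the index of its first occurrence (hash lookup)
--     seen = {}
--     out = []
--     for x in items:
--         if x not in seen:
--             seen[x] = len(seen)
--         out.append(seen[x])
--     return out
--
--
-- def _half_mirrors(a):
--     # mirror lines touching the TOP edge: i such that a[:2i] is a palindrome;
--     # an all-equal prefix is trivially a palindrome, and the centre pair and
--     # pref[0] == x are O(1) pre-checks before the full comparison
--     out = set()
--     pref = []
--     allsame = True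
--     for x in a:
--         if pref and x != pref[0]:
--             allsame = False
--         pref.append(x)
--         length = len(pref)
--         half = length // 2
--         if length % 2 == 0 and (allsame or (pref[half - 1] == pref[half]
--                 and pref[0] == x and pref == pref[-1::-1])):
--             out.add(half)
--     return out
--
--
-- def _mirror(a):
--     # a mirror line reflects rows until it runs off the top or the bottom edge,
--     # so the mirror positions are exactly the even palindromic prefixes of a
--     # plus the even palindromic suffixes (= palindromic prefixes of reversed a)
--     n = len(a)
--     m = _half_mirrors(a) | {n - j for j in _half_mirrors(a[::-1])}
--     return min(m) if m else 0
-- ===== Notes on version B (the rewrite author's own statement) =====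
-- stated objective: alternative
-- what changed: B characterizes a reflection line as an even-length palindromic prefix or suffix of the row sequence, collecting all such lengths in one accumulating pass (and via the reversed list) and taking the minimum, after hash-interning equal rows/columns to small integer ids via a dict, instead of A's scan over candidate lines each verified by an outward pairwise row-comparison loop (first on rows, then on the flipped matrix).
import Mathlib
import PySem

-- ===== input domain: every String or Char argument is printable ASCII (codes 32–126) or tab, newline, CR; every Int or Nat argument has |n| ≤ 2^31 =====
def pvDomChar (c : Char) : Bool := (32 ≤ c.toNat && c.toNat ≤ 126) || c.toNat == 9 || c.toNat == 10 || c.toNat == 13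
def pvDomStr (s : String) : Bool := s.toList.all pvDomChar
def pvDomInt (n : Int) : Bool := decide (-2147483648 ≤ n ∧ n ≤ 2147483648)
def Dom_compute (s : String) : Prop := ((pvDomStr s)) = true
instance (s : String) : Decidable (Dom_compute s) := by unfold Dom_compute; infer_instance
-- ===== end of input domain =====

-- B finds reflection lines as edge-anchored even palindromic prefixes/suffixes of the row
-- sequence (collected in one accumulating pass, then min) after hash-interning equal rows /
-- columns to small integer ids, instead of A's candidate scan with outward pairwise row
-- comparison (objective: alternative). Return-value equivalence is proved for all inputs.

-- Python's zip(*matrix) (shared primitive used by BOTH sources): columns truncated to the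
-- shortest row, exact as in CPython.
def pvZipStar (m : List (List Char)) : List (List Char) :=
  if h : m = [] ∨ m.any (fun r => r.isEmpty) then []
  else (m.map (fun r => r.headD ' ')) :: pvZipStar (m.map List.tail)
termination_by (m.headD []).length
decreasing_by
  rw [not_or] at h
  obtain ⟨h1, h2⟩ := h
  match m, h1 with
  | a :: rest, _ =>
    simp only [List.any_cons, Bool.or_eq_true, not_or, Bool.not_eq_true] at h2
    simp only [List.headD_cons]
    have ha : a ≠ [] := by simpa [List.isEmpty_iff] using h2.1
    cases a with
    | nil => exact absurd rfl ha
    | cons x xs => simp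

-- ===== PORT A =====
def pvFlip90 (m : List (List Char)) : List (List Char) :=
  (pvZipStar m).map List.reverse

def pvCheckHsym (p : List (List Char)) (i : Int) : Bool :=
  ((PySem.List.pyRange i (-1) (-1)).zip (PySem.List.pyRange (i+1) (PySem.List.len p) 1)).all
    (fun ij => PySem.List.pyGetD p ij.1 [] == PySem.List.pyGetD p ij.2 [])

def pvSearchH (p : List (List Char)) : Option Int :=
  ((PySem.List.pyRange 0 (PySem.List.len p - 1) 1).find? (fun i => pvCheckHsym p i)).map
    (fun i => i + 1)

def pvFlushA (p : List (List Char)) (r : Int) : Int :=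
  match pvSearchH p with
  | some h => r + h * 100
  | none =>
    match pvSearchH (pvFlip90 p) with
    | some v => r + v
    | none => r

def pvStepA (st : List (List Char) × Int) (line : String) : List (List Char) × Int :=
  if line == "" then
    ([], if st.1 == [] then st.2 else pvFlushA st.1 st.2)
  else (st.1 ++ [line.toList], st.2)

def compute (s : String) : Int :=
  (((PySem.Str.splitlines s) ++ [""]).foldl pvStepA ([], 0)).2

-- ===== PORT B =====
-- _ids: membership test, conditional insert of the next id (= current len), then lookup;
-- the getD default 0 is never used (the key was just ensured present, Python's seen[x]).
def pvIdsGo {α : Type} [BEq α] (d : PySem.Dict α Int) : List α → List Int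
  | [] => []
  | x :: t =>
    let d' := if d.contains x then d else d.insert x (d.size : Int)
    d'.getD x 0 :: pvIdsGo d' t

def pvIds {α : Type} [BEq α] (items : List α) : List Int :=
  pvIdsGo PySem.Dict.empty items

-- _half_mirrors: one pass; pref is the prefix seen so far; an all-equal prefix is
-- trivially a palindrome, and the centre pair / pref[0] (indices into a nonempty list,
-- so Python cannot raise; ported total with default 0) are O(1) pre-checks before the
-- full comparison; pref[-1::-1] is exactly List.reverse
def pvHalfMirrors (a : List Int) : PySem.Set Int :=
  (a.foldl
    (fun (st : List Int × Bool × PySem.Set Int) x =>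
      let allsame := if !(st.1 == []) && !(x == PySem.List.pyGetD st.1 0 0) then false
        else st.2.1
      let pref := st.1 ++ [x]
      let len : Int := PySem.List.len pref
      let half : Int := PySem.Int.floordiv len 2
      if (PySem.Int.mod len 2 == 0) &&
          (allsame ||
            ((PySem.List.pyGetD pref (half - 1) 0 == PySem.List.pyGetD pref half 0) &&
             (PySem.List.pyGetD pref 0 0 == x) && (pref == pref.reverse))) then
        (pref, allsame, st.2.2.add half)
      else (pref, allsame, st.2.2))
    ([], true, PySem.Set.empty)).2.2

-- _mirror: min(m) if m else 0 — min? is none exactly when the set is empty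
def pvMirrorB (a : List Int) : Int :=
  let n := PySem.List.len a
  let m := PySem.Set.union (pvHalfMirrors a)
    (PySem.Set.ofList ((pvHalfMirrors a.reverse).map (fun j => n - j)))
  match PySem.List.min? m (fun x => x) with
  | some v => v
  | none => 0

-- itertools.groupby(lines, key=bool), keeping only the truthy groups
def pvBlocks : List String → List (List String)
  | [] => []
  | l :: rest =>
    if l == "" then pvBlocks rest
    else ((l :: rest).takeWhile (fun x => !(x == ""))) ::
         pvBlocks ((l :: rest).dropWhile (fun x => !(x == "")))
termination_by ls => ls.length
decreasing_by
  · simp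
  · rename_i hne
    have hb : (l == "") = false := by
      cases hx : (l == "") with
      | false => rfl
      | true => exact absurd hx hne
    simp only [List.dropWhile_cons, hb, Bool.not_false, if_true]
    exact Nat.lt_succ_of_le (List.length_dropWhile_le _ _)

def pvScoreB (rows : List String) : Int :=
  let h := pvMirrorB (pvIds rows)
  if h ≠ 0 then 100 * h
  else pvMirrorB (pvIds (pvZipStar (rows.map String.toList)))

def compute_alt (s : String) : Int :=
  (pvBlocks (PySem.Str.splitlines s)).foldl (fun acc rows => acc + pvScoreB rows) 0

-- ===== PRECONDITION & SPEC =====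
def Spec_compute (s : String) (out : Int) : Prop := out = compute_alt s
instance (s : String) (out : Int) : Decidable (Spec_compute s out) := by unfold Spec_compute; infer_instance

-- ===== CLAIM (what is proved, stated in full; the proofs are below) =====
def Claim_equal_compute : Prop := ∀ (s : String), Dom_compute s → Spec_compute s (compute s)

-- ===== LEMMAS AND PROOFS =====

-- A's fold result, described through the mixed block decomposition
def pvMBlocks : List (List Char) → List String → List (List (List Char))
  | p, [] => if p = [] then [] else [p]
  | p, l :: rest =>
    if l == "" then (if p = [] then [] else [p]) ++ pvMBlocks [] rest
    else pvMBlocks (p ++ [l.toList]) rest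

lemma pvFlushA_shift (p : List (List Char)) (r : Int) :
    pvFlushA p r = r + pvFlushA p 0 := by
  unfold pvFlushA
  cases pvSearchH p <;> cases pvSearchH (pvFlip90 p) <;> simp

lemma foldA_eq (ls : List String) : ∀ (p : List (List Char)) (r : Int),
    ((ls ++ [""]).foldl pvStepA (p, r)).2 = r + ((pvMBlocks p ls).map (fun q => pvFlushA q 0)).sum := by
  induction ls with
  | nil =>
    intro p r
    show (pvStepA (p, r) "").2 = _
    by_cases hp : p = []
    · simp [pvStepA, hp, pvMBlocks]
    · have hstep : pvStepA (p, r) "" = ([], pvFlushA p r) := by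
        have hb : (p == []) = false := by simpa using hp
        simp [pvStepA, hb]
      rw [hstep, pvFlushA_shift]
      simp [pvMBlocks, hp]
  | cons l rest ih =>
    intro p r
    show (List.foldl pvStepA (pvStepA (p, r) l) (rest ++ [""])).2 = _
    by_cases hl : l = ""
    · subst hl
      by_cases hp : p = []
      · have hstep : pvStepA (p, r) "" = ([], r) := by simp [pvStepA, hp]
        rw [hstep, ih]
        simp [pvMBlocks, hp]
      · have hstep : pvStepA (p, r) "" = ([], pvFlushA p r) := by
          have hb : (p == []) = false := by simpa using hp
          simp [pvStepA, hb]
        rw [hstep, ih, pvFlushA_shift]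
        simp [pvMBlocks, hp, add_assoc]
    · have hb : (l == "") = false := by simpa using hl
      have hstep : pvStepA (p, r) l = (p ++ [l.toList], r) := by simp [pvStepA, hb]
      rw [hstep, ih]
      simp [pvMBlocks, hb]

lemma mblocks_run (rest : List String) : ∀ (p : List (List Char)), p ≠ [] →
    pvMBlocks p rest =
      (p ++ (rest.takeWhile (fun x => !(x == ""))).map String.toList) ::
        pvMBlocks [] (rest.dropWhile (fun x => !(x == ""))) := by
  induction rest with
  | nil => intro p hp; simp [pvMBlocks, hp]
  | cons l t ih =>
    intro p hp
    by_cases hl : l = ""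
    · subst hl
      simp [pvMBlocks, hp]
    · have hb : (l == "") = false := by simpa using hl
      simp only [pvMBlocks, hb, Bool.false_eq_true, if_false, List.takeWhile_cons,
        List.dropWhile_cons, Bool.not_false, if_true]
      rw [ih (p ++ [l.toList]) (by simp)]
      simp

lemma mblocks_nil_eq (ls : List String) :
    pvMBlocks [] ls = (pvBlocks ls).map (List.map String.toList) := by
  induction hn : ls.length using Nat.strong_induction_on generalizing ls with
  | _ n ih =>
    cases ls with
    | nil => simp [pvMBlocks, pvBlocks]
    | cons l rest =>
      by_cases hl : l = ""
      · subst hl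
        rw [pvBlocks]
        simp only [pvMBlocks, BEq.rfl, if_true, List.nil_append]
        exact ih rest.length (by simp [← hn]) rest rfl
      · have hb : (l == "") = false := by simpa using hl
        rw [pvBlocks]
        simp only [pvMBlocks, hb, Bool.false_eq_true, if_false, List.nil_append]
        rw [mblocks_run rest [l.toList] (by simp)]
        simp only [List.map_cons, List.takeWhile_cons, List.dropWhile_cons, hb,
          Bool.not_false, if_true]
        refine List.cons_eq_cons.mpr ⟨by simp, ?_⟩
        exact ih (rest.dropWhile (fun x => !(x == ""))).length
          (by simp only [← hn, List.length_cons]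
              exact Nat.lt_succ_of_le (List.length_dropWhile_le _ _)) _ rfl

-- ===== the symmetry predicate both sides are reduced to =====

-- a mirror between positions i-1 and i: the k = min(i, n-i) rows on each side match
def pvSym {α : Type} (l : List α) (i : Nat) : Prop :=
  (l.drop (i - min i (l.length - i))).take (min i (l.length - i)) =
    ((l.drop i).take (min i (l.length - i))).reverse

lemma zip_range_range (a b : Nat) :
    (List.range a).zip (List.range b) = (List.range (min a b)).map (fun t => (t, t)) := by
  apply List.ext_getElem?
  intro i
  simp only [List.zip_eq_zipWith, List.getElem?_zipWith', List.getElem?_map]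
  rcases Nat.lt_or_ge i a with h1 | h1 <;> rcases Nat.lt_or_ge i b with h2 | h2 <;>
    simp [h1, h2]

lemma find?_congr_mem {α : Type} (l : List α) (p q : α → Bool)
    (h : ∀ x ∈ l, p x = q x) : l.find? p = l.find? q := by
  induction l with
  | nil => rfl
  | cons x t ih =>
    simp only [List.find?_cons]
    rw [h x (by simp)]
    cases q x with
    | true => rfl
    | false => exact ih (fun y hy => h y (by simp [hy]))

-- check_horizontal_symmetry as a ∀ over the rows (with Nat indices)
lemma checkHsym_eq (q : List (List Char)) (it : Nat) :
    pvCheckHsym q (it : Int) =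
      decide (∀ t < min (it + 1) (q.length - 1 - it),
        q.getD (it - t) [] = q.getD (it + 1 + t) []) := by
  unfold pvCheckHsym
  rw [PySem.List.len_eq]
  rw [PySem.List.pyRange_neg_one, PySem.List.pyRange_one]
  have e1 : ((it : Int) - (-1)).toNat = it + 1 := by omega
  have e2 : (((q.length : Int)) - ((it : Int) + 1)).toNat = q.length - 1 - it := by omega
  rw [e1, e2, List.zip_map, zip_range_range, List.map_map, List.all_map]
  rw [Bool.eq_iff_iff]
  simp only [List.all_eq_true, List.mem_range, decide_eq_true_eq, Function.comp_apply,
    Prod.map_apply]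
  constructor
  · intro h t ht
    have := h t ht
    have c1 : (it : Int) - (t : Int) = ((it - t : Nat) : Int) := by omega
    have c2 : (it : Int) + 1 + (t : Int) = ((it + 1 + t : Nat) : Int) := by omega
    rw [c1, c2, PySem.List.pyGetD_natCast, PySem.List.pyGetD_natCast, beq_iff_eq] at this
    exact this
  · intro h t ht
    have := h t ht
    have c1 : (it : Int) - (t : Int) = ((it - t : Nat) : Int) := by omega
    have c2 : (it : Int) + 1 + (t : Int) = ((it + 1 + t : Nat) : Int) := by omega
    rw [c1, c2, PySem.List.pyGetD_natCast, PySem.List.pyGetD_natCast, beq_iff_eq]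
    exact this

-- a reversed-slice equation is the pairwise row condition (generic element type)
lemma core {α : Type} (l : List α) (dflt : α) (j K : Nat) (h1 : K ≤ j) (h2 : j + K ≤ l.length) :
    ((l.drop (j-K)).take K = ((l.drop j).take K).reverse) ↔
      ∀ t < K, l.getD (j-1-t) dflt = l.getD (j+t) dflt := by
  have hlt : ((l.drop j).take K).length = K := by simp; omega
  have hl1 : ((l.drop (j-K)).take K).length = K := by simp; omega
  constructor
  · intro heq t ht
    rw [List.getD_eq_getElem _ _ (by omega : j - 1 - t < l.length),
        List.getD_eq_getElem _ _ (by omega : j + t < l.length)]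
    have e := congrArg (fun w => w[K-1-t]?) heq
    simp only at e
    rw [List.getElem?_reverse (by rw [hlt]; omega)] at e
    rw [hlt] at e
    simp only [List.getElem?_take, List.getElem?_drop] at e
    have ha : K - 1 - t < K := by omega
    have hb : K - 1 - (K - 1 - t) < K := by omega
    simp only [if_pos ha, if_pos hb] at e
    rw [List.getElem?_eq_getElem (by omega), List.getElem?_eq_getElem (by omega)] at e
    have e2 := Option.some.inj e
    have i1 : j - K + (K - 1 - t) = j - 1 - t := by omega
    have i2 : j + (K - 1 - (K - 1 - t)) = j + t := by omega
    rw [getElem_congr rfl i1 (by omega), getElem_congr rfl i2 (by omega)] at e2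
    exact e2
  · intro hp
    apply List.ext_getElem (by rw [hl1, List.length_reverse, hlt])
    intro u hu1 hu2
    rw [hl1] at hu1
    have e := hp (K-1-u) (by omega)
    rw [List.getD_eq_getElem _ _ (by omega), List.getD_eq_getElem _ _ (by omega)] at e
    rw [List.getElem_reverse]
    simp only [List.getElem_take, List.getElem_drop, hlt]
    have i1 : j - K + u = j - 1 - (K - 1 - u) := by omega
    rw [getElem_congr rfl i1 (by omega), e]

-- pvCheckHsym at index i-1 is exactly pvSym at i
lemma checkHsym_iff_sym (q : List (List Char)) (i : Nat) (h1 : 1 ≤ i) (h2 : i < q.length) :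
    pvCheckHsym q ((i - 1 : Nat) : Int) = true ↔ pvSym q i := by
  rw [checkHsym_eq q (i - 1)]
  have e1 : (i - 1) + 1 = i := by omega
  have e2 : q.length - 1 - (i - 1) = q.length - i := by omega
  rw [e1, e2]
  unfold pvSym
  rw [core q [] i (min i (q.length - i)) (by omega) (by omega)]
  rw [decide_eq_true_iff]

-- pvSearchH finds the least mirror position, if any
lemma find?_range_some {p : Nat → Bool} {m i : Nat}
    (h : (List.range m).find? p = some i) : p i = true ∧ ∀ j < i, p j = false := by
  induction m with
  | zero => exact absurd h (by simp)
  | succ m ih =>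
    rw [List.range_succ, List.find?_append] at h
    cases hf : (List.range m).find? p with
    | some k =>
      rw [hf] at h
      have hki : k = i := by simpa using h
      subst hki
      exact ih hf
    | none =>
      rw [hf] at h
      rw [List.find?_singleton] at h
      simp only [Option.none_or] at h
      split at h
      · have hmi : m = i := by simpa using h
        subst hmi
        refine ⟨by assumption, fun j hj => ?_⟩
        have := List.find?_eq_none.mp hf j (by simpa using hj)
        simpa using this
      · simp at h

lemma searchH_some (q : List (List Char)) (h : Int)
    (hh : pvSearchH q = some h) :
    ∃ i : Nat, h = (i : Int) ∧ 1 ≤ i ∧ i < q.length ∧ pvSym q i ∧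
      ∀ j : Nat, 1 ≤ j → j < i → ¬ pvSym q j := by
  unfold pvSearchH at hh
  rw [Option.map_eq_some_iff] at hh
  obtain ⟨i, hfind, hi⟩ := hh
  rw [PySem.List.len_eq, PySem.List.pyRange_one] at hfind
  have e0 : (((q.length : Int) - 1) - 0).toNat = q.length - 1 := by omega
  rw [e0, List.find?_map] at hfind
  have hfun : ((fun i => pvCheckHsym q i) ∘ fun k : Nat => (0 : Int) + (k : Int)) =
      fun k : Nat => pvCheckHsym q ((k : Nat) : Int) := by
    funext k
    simp
  rw [hfun] at hfind
  rw [Option.map_eq_some_iff] at hfind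
  obtain ⟨k, hfk, hk⟩ := hfind
  have hsp := find?_range_some hfk
  obtain ⟨hp, hmin⟩ := hsp
  have hklt : k < q.length - 1 := by
    have := List.mem_of_find?_eq_some hfk
    exact List.mem_range.mp this
  refine ⟨k + 1, by omega, by omega, by omega, ?_, ?_⟩
  · have := (checkHsym_iff_sym q (k + 1) (by omega) (by omega)).mp
    rw [show (k + 1 - 1 : Nat) = k from by omega] at this
    exact this hp
  · intro j hj1 hj2 hsym
    have hjf := hmin (j - 1) (by omega)
    have hc := (checkHsym_iff_sym q j hj1 (by omega)).mpr hsym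
    rw [hc] at hjf
    exact absurd hjf (by simp)

lemma searchH_none (q : List (List Char)) (hh : pvSearchH q = none) :
    ∀ i : Nat, 1 ≤ i → i < q.length → ¬ pvSym q i := by
  unfold pvSearchH at hh
  rw [Option.map_eq_none_iff] at hh
  rw [PySem.List.len_eq, PySem.List.pyRange_one] at hh
  have e0 : (((q.length : Int) - 1) - 0).toNat = q.length - 1 := by omega
  rw [e0, List.find?_map] at hh
  have hfun : ((fun i => pvCheckHsym q i) ∘ fun k : Nat => (0 : Int) + (k : Int)) =
      fun k : Nat => pvCheckHsym q ((k : Nat) : Int) := by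
    funext k
    simp
  rw [hfun, Option.map_eq_none_iff] at hh
  intro i hi1 hi2 hsym
  have hmem : (i - 1 : Nat) ∈ List.range (q.length - 1) := by
    rw [List.mem_range]; omega
  have := List.find?_eq_none.mp hh (i - 1) hmem
  exact this ((checkHsym_iff_sym q i hi1 hi2).mpr hsym)

-- ===== pvSym transfers along maps injective on the list =====

lemma map_eq_map_of_injOn {α β : Type} (g : α → β) (l : List α) :
    ∀ (u v : List α), (∀ x ∈ u, x ∈ l) → (∀ x ∈ v, x ∈ l) →
    (∀ x ∈ l, ∀ y ∈ l, g x = g y → x = y) →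
    (u.map g = v.map g ↔ u = v) := by
  intro u
  induction u with
  | nil => intro v _ _ _; cases v <;> simp
  | cons x t ih =>
    intro v hu hv hinj
    cases v with
    | nil => simp
    | cons y w =>
      simp only [List.map_cons, List.cons_eq_cons]
      rw [ih w (fun z hz => hu z (by simp [hz])) (fun z hz => hv z (by simp [hz])) hinj]
      constructor
      · rintro ⟨h1, h2⟩
        exact ⟨hinj x (hu x (by simp)) y (hv y (by simp)) h1, h2⟩
      · rintro ⟨h1, h2⟩; exact ⟨by rw [h1], h2⟩

lemma pvSym_map {α β : Type} (g : α → β) (l : List α)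
    (hinj : ∀ x ∈ l, ∀ y ∈ l, g x = g y → x = y) (i : Nat) :
    pvSym (l.map g) i ↔ pvSym l i := by
  unfold pvSym
  rw [List.length_map]
  rw [← List.map_drop, ← List.map_take, ← List.map_drop, ← List.map_take, ← List.map_reverse]
  exact map_eq_map_of_injOn g l _ _
    (fun x hx => List.mem_of_mem_drop (List.mem_of_mem_take hx))
    (fun x hx => List.mem_of_mem_drop (List.mem_of_mem_take (List.mem_reverse.mp hx))) hinj

-- ===== _ids: interning = index of first occurrence =====

def pvRank {α : Type} [BEq α] (l : List α) (x : α) : Int :=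
  ((PySem.Set.ofList l).idxOf x : Nat)

lemma idsGo_spec {α : Type} [BEq α] [LawfulBEq α] [DecidableEq α]
    (l : List α) : ∀ (s : List α) (d : PySem.Dict α Int),
    (∀ x, d.get? x = if x ∈ s then some ((List.idxOf x s : Nat) : Int) else none) →
    d.size = s.length →
    pvIdsGo d l = l.map (fun x => ((List.idxOf x (PySem.Set.update s l) : Nat) : Int)) := by
  induction l with
  | nil => intro s d _ _; simp [pvIdsGo]
  | cons x t ih =>
    intro s d hg hs
    have hcontains : d.contains x = (x ∈ s : Bool) := by
      rw [PySem.Dict.contains_eq_isSome_get?, hg x]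
      by_cases hx : x ∈ s <;> simp [hx]
    by_cases hx : x ∈ s
    · have hc : d.contains x = true := by rw [hcontains]; simp [hx]
      have hupd : PySem.Set.update s (x :: t) = PySem.Set.update s t := by
        show List.foldl PySem.Set.add s (x :: t) = _
        rw [List.foldl_cons]
        congr 1
        show PySem.Set.add s x = s
        unfold PySem.Set.add
        rw [show PySem.Set.contains s x = (x ∈ s : Bool) from by
          simp [PySem.Set.contains, hx]]
        simp [hx]
      rw [pvIdsGo]
      simp only [hc, if_true]
      rw [ih s d hg hs, List.map_cons, hupd]
      congr 1
      rw [PySem.Dict.getD_eq_get?_getD, hg x]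
      simp only [hx, if_true, Option.getD_some]
      have hstable : List.idxOf x (PySem.Set.update s t) = List.idxOf x s := by
        obtain ⟨w, hw⟩ : ∃ w, PySem.Set.update s t = s ++ w := by
          clear hg hs hupd hc hcontains ih hx
          induction t generalizing s with
          | nil => exact ⟨[], by simp [PySem.Set.update]⟩
          | cons y u ihu =>
            show ∃ w, List.foldl PySem.Set.add (PySem.Set.add s y) u = s ++ w
            unfold PySem.Set.add
            split
            · exact ihu s
            · obtain ⟨w, hw⟩ := ihu (s ++ [y])
              exact ⟨[y] ++ w, by rw [← List.append_assoc]; exact hw⟩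
        rw [hw, List.idxOf_append, if_pos hx]
      rw [hstable]
    · have hc : d.contains x = false := by rw [hcontains]; simp [hx]
      have hupd : PySem.Set.update s (x :: t) = PySem.Set.update (s ++ [x]) t := by
        show List.foldl PySem.Set.add s (x :: t) = _
        rw [List.foldl_cons]
        congr 1
        show PySem.Set.add s x = s ++ [x]
        unfold PySem.Set.add
        rw [show PySem.Set.contains s x = (x ∈ s : Bool) from by
          simp [PySem.Set.contains, hx]]
        simp [hx]
      rw [pvIdsGo]
      simp only [hc, if_false, Bool.false_eq_true]
      have hg' : ∀ y, (d.insert x (d.size : Int)).get? y =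
          if y ∈ s ++ [x] then some ((List.idxOf y (s ++ [x]) : Nat) : Int) else none := by
        intro y
        rw [PySem.Dict.get?_insert, hg y, List.idxOf_append]
        by_cases hyx : y = x
        · subst hyx
          simp [hx, hs]
        · simp only [if_neg hyx]
          by_cases hy : y ∈ s
          · simp [hy]
          · have : y ∈ [x] ↔ False := by simp [hyx]
            simp [hy, hyx]
      have hs' : (d.insert x (d.size : Int)).size = (s ++ [x]).length := by
        rw [PySem.Dict.size_insert, hc]
        simp [hs]
      rw [ih (s ++ [x]) _ hg' hs', List.map_cons, hupd]
      congr 1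
      rw [PySem.Dict.getD_eq_get?_getD, hg' x]
      have hxm : x ∈ s ++ [x] := by simp
      simp only [hxm, if_true, Option.getD_some]
      have hstable : List.idxOf x (PySem.Set.update (s ++ [x]) t) = s.length := by
        obtain ⟨w, hw⟩ : ∃ w, PySem.Set.update (s ++ [x]) t = (s ++ [x]) ++ w := by
          clear hg hs hupd hc hcontains ih hg' hs' hx
          generalize (s ++ [x]) = s0
          induction t generalizing s0 with
          | nil => exact ⟨[], by simp [PySem.Set.update]⟩
          | cons y u ihu =>
            show ∃ w, List.foldl PySem.Set.add (PySem.Set.add s0 y) u = s0 ++ w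
            unfold PySem.Set.add
            split
            · exact ihu s0
            · obtain ⟨w, hw⟩ := ihu (s0 ++ [y])
              exact ⟨[y] ++ w, by rw [← List.append_assoc]; exact hw⟩
        rw [hw, List.idxOf_append, if_pos hxm, List.idxOf_append, if_neg hx]
        simp [List.idxOf_cons_self]
      rw [hstable, List.idxOf_append, if_neg hx]
      simp [List.idxOf_cons_self]

lemma pvIds_eq_map {α : Type} [BEq α] [LawfulBEq α] [DecidableEq α] (l : List α) :
    pvIds l = l.map (pvRank l) := by
  unfold pvIds pvRank
  rw [idsGo_spec l [] PySem.Dict.empty (by intro x; simp [PySem.Dict.get?_empty])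
    (by simp [PySem.Dict.size_empty])]
  have hu : PySem.Set.update ([] : PySem.Set α) l = PySem.Set.ofList l := by
    rw [PySem.Set.ofList_eq_foldl]
    rfl
  rw [hu]

lemma pvRank_inj {α : Type} [BEq α] [LawfulBEq α] [DecidableEq α] (l : List α) :
    ∀ x ∈ l, ∀ y ∈ l, pvRank l x = pvRank l y → x = y := by
  intro x hx y hy h
  unfold pvRank at h
  have hx' : x ∈ PySem.Set.ofList l := (PySem.Set.mem_ofList l x).mpr hx
  have hn : List.idxOf x (PySem.Set.ofList l) = List.idxOf y (PySem.Set.ofList l) := by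
    omega
  exact (List.idxOf_inj hx').mp hn

-- ===== _half_mirrors: membership = even palindromic prefix =====

lemma pal_append {α : Type} {u v : List α} (h : u.length = v.length) :
    (u ++ v = (u ++ v).reverse) ↔ u = v.reverse := by
  rw [List.reverse_append]
  constructor
  · intro he
    exact (List.append_inj he (by rw [h, List.length_reverse])).1
  · intro he
    rw [he, List.reverse_reverse]

lemma all_eq_pal {α : Type} (w : List α) (c : α) (h : ∀ u ∈ w, u = c) : w = w.reverse := by
  apply List.ext_getElem (by simp)
  intro i h1 h2
  rw [List.getElem_reverse]
  rw [h _ (List.getElem_mem _), h _ (List.getElem_mem _)]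

lemma halfM_step (a : List Int) :
    ∀ (l : List Int) (k : Nat), a.drop k = l → ∀ (S : PySem.Set Int) (x : Int),
    (x ∈ (l.foldl
      (fun (st : List Int × Bool × PySem.Set Int) x =>
        let allsame := if !(st.1 == []) && !(x == PySem.List.pyGetD st.1 0 0) then false
          else st.2.1
        let pref := st.1 ++ [x]
        let len : Int := PySem.List.len pref
        let half : Int := PySem.Int.floordiv len 2
        if (PySem.Int.mod len 2 == 0) &&
            (allsame ||
              ((PySem.List.pyGetD pref (half - 1) 0 == PySem.List.pyGetD pref half 0) &&
               (PySem.List.pyGetD pref 0 0 == x) && (pref == pref.reverse))) then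
          (pref, allsame, st.2.2.add half)
        else (pref, allsame, st.2.2))
      (a.take k, (a.take k).all (fun u => u == PySem.List.pyGetD a 0 0), S)).2.2 ↔
      x ∈ S ∨ ∃ i : Nat, x = (i : Int) ∧ k < 2*i ∧ 2*i ≤ a.length ∧
        a.take (2*i) = (a.take (2*i)).reverse) := by
  intro l
  induction l with
  | nil =>
    intro k hk S x
    simp only [List.foldl_nil]
    have hlen : a.length ≤ k := by
      have := congrArg List.length hk
      simp at this
      omega
    constructor
    · intro h; exact Or.inl h
    · rintro (h | ⟨i, _, h2, h3, _⟩)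
      · exact h
      · omega
  | cons y t ih =>
    intro k hk S x
    have hklt : k < a.length := by
      have := congrArg List.length hk
      simp at this
      omega
    have hy : a[k]'hklt = y := by
      have h1 : (a.drop k)[0]'(by rw [hk]; simp) = y := by
        simp [hk]
      rw [List.getElem_drop] at h1
      simpa using h1
    have hdrop : a.drop (k + 1) = t := by
      have h2 : (a.drop k).drop 1 = t := by rw [hk]; rfl
      rw [List.drop_drop] at h2
      exact h2
    have htake : a.take (k + 1) = a.take k ++ [y] := by
      rw [List.take_add_one, List.getElem?_eq_getElem hklt, hy]
      rfl
    have htlen : (a.take (k+1)).length = k + 1 := by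
      simp only [List.length_take]
      omega
    have ha0 : PySem.List.pyGetD a 0 0 = a[0]'(by omega) := by
      rw [show ((0 : Int)) = ((0 : Nat) : Int) from rfl, PySem.List.pyGetD_natCast]
      exact List.getD_eq_getElem _ _ (by omega)
    simp only [List.foldl_cons]
    -- the sticky all-equal flag stays the invariant after one more element
    have hflag : (if !(a.take k == []) && !(y == PySem.List.pyGetD (a.take k) 0 0) then false
        else (a.take k).all (fun u => u == PySem.List.pyGetD a 0 0)) =
        (a.take (k+1)).all (fun u => u == PySem.List.pyGetD a 0 0) := by
      rcases Nat.eq_zero_or_pos k with hk0 | hkpos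
      · subst hk0
        rw [htake]
        simp only [List.take_zero, List.nil_append]
        rw [show (([] : List Int) == []) = true from rfl]
        simp only [Bool.not_true, Bool.false_and, Bool.false_eq_true, if_false]
        rw [show (([] : List Int).all (fun u => u == PySem.List.pyGetD a 0 0)) = true from rfl]
        rw [show (([y] : List Int).all (fun u => u == PySem.List.pyGetD a 0 0)) = true from by
          simp only [List.all_cons, List.all_nil, Bool.and_true]
          rw [ha0]
          exact beq_iff_eq.mpr hy.symm]
      · have hne : (a.take k == ([] : List Int)) = false := by
          rw [beq_eq_false_iff_ne]
          intro hcon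
          have h3 : (a.take k).length = 0 := by rw [hcon]; rfl
          rw [List.length_take] at h3
          omega
        have hfirst : PySem.List.pyGetD (a.take k) 0 0 = a[0]'(by omega) := by
          rw [show ((0 : Int)) = ((0 : Nat) : Int) from rfl, PySem.List.pyGetD_natCast]
          rw [List.getD_eq_getElem _ _ (by simp; omega)]
          exact List.getElem_take
        rw [hne, hfirst]
        by_cases hxy : y = a[0]'(by omega)
        · rw [beq_iff_eq.mpr hxy]
          simp only [Bool.not_false, Bool.not_true, Bool.true_and, Bool.false_eq_true, if_false]
          rw [htake, List.all_append]
          rw [show (([y] : List Int).all (fun u => u == PySem.List.pyGetD a 0 0)) = true from by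
            simp only [List.all_cons, List.all_nil, Bool.and_true]
            rw [ha0]
            exact beq_iff_eq.mpr hxy]
          rw [Bool.and_true]
        · rw [beq_eq_false_iff_ne.mpr hxy]
          simp only [Bool.not_false, Bool.true_and, if_true]
          rw [htake, List.all_append]
          rw [show (([y] : List Int).all (fun u => u == PySem.List.pyGetD a 0 0)) = false from by
            simp only [List.all_cons, List.all_nil, Bool.and_true]
            rw [ha0]
            exact beq_eq_false_iff_ne.mpr hxy]
          rw [Bool.and_false]
    rw [hflag]
    have hlenpref : PySem.List.len (a.take k ++ [y]) = ((k + 1 : Nat) : Int) := by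
      rw [PySem.List.len_eq, ← htake, htlen]
    have hfd : PySem.Int.floordiv ((k+1 : Nat) : Int) 2 = (((k+1)/2 : Nat) : Int) := by
      rw [show ((2 : Int)) = ((2 : Nat) : Int) from rfl, PySem.Int.floordiv_natCast]
    have hmod : ((PySem.Int.mod ((k+1 : Nat) : Int) 2 == 0)) = decide ((k+1) % 2 = 0) := by
      rw [show ((2 : Int)) = ((2 : Nat) : Int) from rfl, PySem.Int.mod_natCast]
      by_cases hm : (k+1) % 2 = 0
      · simp [hm]
      · have hm1 : (k+1) % 2 = 1 := by omega
        simp [hm1, hm]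
    -- the branch condition: the pre-checks are implied by the palindrome test, and the
    -- all-equal flag implies it
    have hcond : ((PySem.Int.mod (PySem.List.len (a.take k ++ [y])) 2 == 0) &&
          (((a.take (k+1)).all (fun u => u == PySem.List.pyGetD a 0 0)) ||
            ((PySem.List.pyGetD (a.take k ++ [y])
                (PySem.Int.floordiv (PySem.List.len (a.take k ++ [y])) 2 - 1) 0 ==
              PySem.List.pyGetD (a.take k ++ [y])
                (PySem.Int.floordiv (PySem.List.len (a.take k ++ [y])) 2) 0) &&
             (PySem.List.pyGetD (a.take k ++ [y]) 0 0 == y) &&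
             ((a.take k ++ [y]) == (a.take k ++ [y]).reverse)))) =
        ((decide ((k+1) % 2 = 0)) && decide (a.take (k+1) = (a.take (k+1)).reverse)) := by
      rw [hlenpref, hfd, ← htake, hmod]
      by_cases he : (k+1) % 2 = 0
      · by_cases hp : a.take (k+1) = (a.take (k+1)).reverse
        · have hh2 : 1 ≤ (k+1)/2 ∧ 2 * ((k+1)/2) = k + 1 := by omega
          have hg : PySem.List.pyGetD (a.take (k+1)) 0 0 = y := by
            rw [show ((0 : Int)) = ((0 : Nat) : Int) from rfl, PySem.List.pyGetD_natCast]
            have hb0 : 0 < (a.take (k+1)).length := by rw [htlen]; omega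
            rw [List.getD_eq_getElem _ _ hb0]
            have e := congrArg (fun w => w[0]?) hp
            simp only at e
            rw [List.getElem?_reverse (by rw [htlen]; omega)] at e
            rw [htlen] at e
            rw [show k + 1 - 1 - 0 = k from by omega] at e
            rw [List.getElem?_eq_getElem hb0] at e
            simp only [List.getElem?_take] at e
            rw [if_pos (by omega : k < k + 1), List.getElem?_eq_getElem hklt, hy] at e
            exact Option.some.inj e
          have hc1 : PySem.List.pyGetD (a.take (k+1)) ((((k+1)/2 : Nat) : Int) - 1) 0 =
              PySem.List.pyGetD (a.take (k+1)) (((k+1)/2 : Nat) : Int) 0 := by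
            rw [show ((((k+1)/2 : Nat) : Int) - 1) = (((k+1)/2 - 1 : Nat) : Int) from by omega]
            rw [PySem.List.pyGetD_natCast, PySem.List.pyGetD_natCast]
            rw [List.getD_eq_getElem _ _ (by rw [htlen]; omega),
                List.getD_eq_getElem _ _ (by rw [htlen]; omega)]
            have e := congrArg (fun w => w[(k+1)/2 - 1]?) hp
            simp only at e
            rw [List.getElem?_reverse (by rw [htlen]; omega)] at e
            rw [htlen] at e
            rw [show k + 1 - 1 - ((k+1)/2 - 1) = (k+1)/2 from by omega] at e
            rw [List.getElem?_eq_getElem (by rw [htlen]; omega),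
                List.getElem?_eq_getElem (by rw [htlen]; omega)] at e
            exact Option.some.inj e
          rw [hc1, decide_eq_true hp, beq_iff_eq.mpr hp]
          have hgb : (PySem.List.pyGetD (a.take (k+1)) (((k+1)/2 : Nat) : Int) 0 ==
              PySem.List.pyGetD (a.take (k+1)) (((k+1)/2 : Nat) : Int) 0) = true :=
            beq_self_eq_true _
          rw [hgb]
          rw [hg, beq_self_eq_true y]
          simp
        · have hF : (a.take (k+1)).all (fun u => u == PySem.List.pyGetD a 0 0) = false := by
            cases hA : (a.take (k+1)).all (fun u => u == PySem.List.pyGetD a 0 0) with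
            | false => rfl
            | true =>
              exfalso
              apply hp
              apply all_eq_pal _ (PySem.List.pyGetD a 0 0)
              intro u hu
              exact beq_iff_eq.mp (List.all_eq_true.mp hA u hu)
          have hbpal : ((a.take (k+1)) == (a.take (k+1)).reverse) = false :=
            beq_eq_false_iff_ne.mpr hp
          have hdp : decide (a.take (k+1) = (a.take (k+1)).reverse) = false := by
            rw [decide_eq_false_iff_not]
            exact hp
          rw [hF, hbpal, hdp]
          simp
      · have hde : decide ((k+1) % 2 = 0) = false := by
          rw [decide_eq_false_iff_not]
          exact he
        rw [hde]
        simp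
    rcases hb : ((decide ((k+1) % 2 = 0)) && decide (a.take (k+1) = (a.take (k+1)).reverse))
        with _ | _
    · -- condition false: no new element
      simp only [hcond, hb]
      simp only [Bool.false_eq_true, if_false]
      rw [show ((a.take k ++ [y],
          (a.take (k+1)).all (fun u => u == PySem.List.pyGetD a 0 0), S) :
          List Int × Bool × PySem.Set Int) =
        (a.take (k+1), (a.take (k+1)).all (fun u => u == PySem.List.pyGetD a 0 0), S) from by
        rw [htake]]
      rw [ih (k+1) hdrop S x]
      simp only [Bool.and_eq_false_iff] at hb
      constructor
      · rintro (h | ⟨i, h1, h2, h3, h4⟩)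
        · exact Or.inl h
        · exact Or.inr ⟨i, h1, by omega, h3, h4⟩
      · rintro (h | ⟨i, h1, h2, h3, h4⟩)
        · exact Or.inl h
        · refine Or.inr ⟨i, h1, ?_, h3, h4⟩
          rcases Nat.lt_or_ge (k+1) (2*i) with hlt | hge
          · exact hlt
          · have h2i : 2*i = k+1 := by omega
            exfalso
            have hev : (k+1) % 2 = 0 := by omega
            have hpal : a.take (k+1) = (a.take (k+1)).reverse := by
              rw [← h2i]
              exact h4
            rcases hb with hb | hb
            · simp [hev] at hb
            · rw [decide_eq_true hpal] at hb
              simp at hb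
    · -- condition true: (k+1)/2 added
      simp only [hcond, hb, if_true]
      rw [hlenpref, hfd]
      rw [show ((a.take k ++ [y],
          (a.take (k+1)).all (fun u => u == PySem.List.pyGetD a 0 0),
          PySem.Set.add S (((k+1)/2 : Nat) : Int)) :
          List Int × Bool × PySem.Set Int) =
        (a.take (k+1), (a.take (k+1)).all (fun u => u == PySem.List.pyGetD a 0 0),
          PySem.Set.add S (((k+1)/2 : Nat) : Int)) from by rw [htake]]
      rw [ih (k+1) hdrop _ x]
      rw [PySem.Set.mem_add]
      simp only [Bool.and_eq_true, decide_eq_true_eq] at hb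
      obtain ⟨hev, hpal⟩ := hb
      constructor
      · rintro ((h | h) | ⟨i, h1, h2, h3, h4⟩)
        · exact Or.inl h
        · refine Or.inr ⟨(k+1)/2, h, by omega, by omega, ?_⟩
          rw [show 2 * ((k+1)/2) = k+1 from by omega]
          exact hpal
        · exact Or.inr ⟨i, h1, by omega, h3, h4⟩
      · rintro (h | ⟨i, h1, h2, h3, h4⟩)
        · exact Or.inl (Or.inl h)
        · rcases Nat.lt_or_ge (k+1) (2*i) with hlt | hge
          · exact Or.inr ⟨i, h1, hlt, h3, h4⟩
          · have h2i : 2*i = k+1 := by omega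
            refine Or.inl (Or.inr ?_)
            rw [h1]
            congr 1
            omega

lemma mem_halfMirrors (a : List Int) (x : Int) :
    x ∈ pvHalfMirrors a ↔ ∃ i : Nat, x = (i : Int) ∧ 1 ≤ i ∧ 2*i ≤ a.length ∧
      a.take (2*i) = (a.take (2*i)).reverse := by
  unfold pvHalfMirrors
  have h0 := halfM_step a a 0 (by simp) PySem.Set.empty x
  rw [show (a.take 0).all (fun u => u == PySem.List.pyGetD a 0 0) = true from rfl] at h0
  simp only [List.take_zero] at h0
  rw [h0]
  constructor
  · rintro (h | ⟨i, h1, h2, h3, h4⟩)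
    · simp [PySem.Set.empty] at h
    · exact ⟨i, h1, by omega, h3, h4⟩
  · rintro ⟨i, h1, h2, h3, h4⟩
    exact Or.inr ⟨i, h1, by omega, h3, h4⟩

-- ===== the mirror-candidate set of B is exactly the pvSym positions =====

lemma prefix_pal_iff_sym {α : Type} (l : List α) (i : Nat) (h1 : 1 ≤ i) (h2 : 2*i ≤ l.length) :
    (l.take (2*i) = (l.take (2*i)).reverse) ↔ pvSym l i := by
  have hmin : min i (l.length - i) = i := by omega
  unfold pvSym
  rw [hmin, Nat.sub_self, List.drop_zero]
  have hsplit : l.take (2*i) = l.take i ++ (l.drop i).take i := by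
    rw [show 2*i = i + i from by omega, List.take_add]
  rw [hsplit]
  rw [pal_append (by simp; omega)]

lemma suffix_pal_iff_sym {α : Type} (l : List α) (j : Nat) (h1 : 1 ≤ j)
    (h2 : 2*j ≤ l.length) :
    (l.reverse.take (2*j) = (l.reverse.take (2*j)).reverse) ↔ pvSym l (l.length - j) := by
  set n := l.length with hn
  have htr : l.reverse.take (2*j) = (l.drop (n - 2*j)).reverse := by
    rw [List.take_reverse]
  rw [htr, List.reverse_reverse]
  have hseg : l.drop (n - 2*j) = (l.drop (n - 2*j)).take j ++ (l.drop (n - j)) := by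
    conv_lhs => rw [← List.take_append_drop j (l.drop (n - 2*j))]
    congr 1
    rw [List.drop_drop]
    congr 1
    omega
  constructor
  · intro h
    have hlen1 : ((l.drop (n - 2*j)).take j).length = j := by simp; omega
    have hlen2 : (l.drop (n - j)).length = j := by simp; omega
    have hpal : (l.drop (n - 2*j)).take j ++ (l.drop (n - j)) =
        ((l.drop (n - 2*j)).take j ++ (l.drop (n - j))).reverse := by
      rw [← hseg]
      exact h.symm
    have := (pal_append (by rw [hlen1, hlen2])).mp hpal
    unfold pvSym
    have hmin : min (n - j) (n - (n - j)) = j := by omega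
    rw [← hn, hmin]
    rw [show n - j - j = n - 2*j from by omega]
    have hv : (l.drop (n - j)).take j = l.drop (n - j) := by
      apply List.take_of_length_le
      simp
      omega
    rw [hv]
    exact this
  · intro h
    unfold pvSym at h
    have hmin : min (n - j) (n - (n - j)) = j := by omega
    rw [← hn, hmin] at h
    rw [show n - j - j = n - 2*j from by omega] at h
    have hv : (l.drop (n - j)).take j = l.drop (n - j) := by
      apply List.take_of_length_le
      simp
      omega
    rw [hv] at h
    rw [eq_comm, hseg]
    rw [pal_append (by simp; omega)]
    exact h

-- membership in B's candidate set, for a list of ids a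
lemma mem_mirrorSet (a : List Int) (x : Int) :
    (x ∈ PySem.Set.union (pvHalfMirrors a)
      (PySem.Set.ofList ((pvHalfMirrors a.reverse).map
        (fun j => PySem.List.len a - j)))) ↔
    ∃ i : Nat, x = (i : Int) ∧ 1 ≤ i ∧ i < a.length ∧ pvSym a i := by
  rw [PySem.Set.mem_union, PySem.Set.mem_ofList, List.mem_map]
  constructor
  · rintro (h | ⟨j, hj, hx⟩)
    · obtain ⟨i, h1, h2, h3, h4⟩ := (mem_halfMirrors a x).mp h
      exact ⟨i, h1, h2, by omega, (prefix_pal_iff_sym a i h2 h3).mp h4⟩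
    · obtain ⟨jn, h1, h2, h3, h4⟩ := (mem_halfMirrors a.reverse j).mp hj
      rw [List.length_reverse] at h3
      refine ⟨a.length - jn, ?_, by omega, by omega, ?_⟩
      · rw [← hx, h1, PySem.List.len_eq]; omega
      · exact (suffix_pal_iff_sym a jn h2 h3).mp h4
  · rintro ⟨i, h1, h2, h3, h4⟩
    rcases Nat.le_total (2*i) a.length with hle | hgt
    · left
      rw [mem_halfMirrors]
      exact ⟨i, h1, h2, hle, (prefix_pal_iff_sym a i h2 hle).mpr h4⟩
    · right
      set j := a.length - i with hj
      have hji : i = a.length - j := by omega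
      refine ⟨(j : Int), ?_, ?_⟩
      · rw [mem_halfMirrors]
        refine ⟨j, rfl, by omega, by rw [List.length_reverse]; omega, ?_⟩
        exact (suffix_pal_iff_sym a j (by omega) (by omega)).mpr (by rw [← hji]; exact h4)
      · rw [PySem.List.len_eq, h1]
        omega

-- pvMirrorB on the interned list returns the least pvSym position of l (0 if none)
lemma mirrorB_of_least {α : Type} [BEq α] [LawfulBEq α] [DecidableEq α]
    (l : List α) (i0 : Nat) (hi1 : 1 ≤ i0) (hi2 : i0 < l.length) (hsym : pvSym l i0)
    (hmin : ∀ j : Nat, 1 ≤ j → j < i0 → ¬ pvSym l j) :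
    pvMirrorB (pvIds l) = (i0 : Int) := by
  have hlen : (pvIds l).length = l.length := by
    rw [pvIds_eq_map]; simp
  have hrfl : pvMirrorB (pvIds l) =
      (match PySem.List.min? (PySem.Set.union (pvHalfMirrors (pvIds l))
        (PySem.Set.ofList ((pvHalfMirrors (pvIds l).reverse).map
          (fun j => PySem.List.len (pvIds l) - j)))) (fun x => x) with
      | some v => v
      | none => 0) := rfl
  rw [hrfl]
  have hmem : ∀ x : Int, (x ∈ PySem.Set.union (pvHalfMirrors (pvIds l))
      (PySem.Set.ofList ((pvHalfMirrors (pvIds l).reverse).map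
        (fun j => PySem.List.len (pvIds l) - j)))) ↔
      ∃ i : Nat, x = (i : Int) ∧ 1 ≤ i ∧ i < l.length ∧ pvSym l i := by
    intro x
    rw [mem_mirrorSet, hlen]
    constructor
    · rintro ⟨i, h1, h2, h3, h4⟩
      refine ⟨i, h1, h2, h3, ?_⟩
      rw [pvIds_eq_map] at h4
      exact (pvSym_map (pvRank l) l (pvRank_inj l) i).mp h4
    · rintro ⟨i, h1, h2, h3, h4⟩
      refine ⟨i, h1, h2, h3, ?_⟩
      rw [pvIds_eq_map]
      exact (pvSym_map (pvRank l) l (pvRank_inj l) i).mpr h4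
  have hi0mem : ((i0 : Int) ∈ PySem.Set.union (pvHalfMirrors (pvIds l))
      (PySem.Set.ofList ((pvHalfMirrors (pvIds l).reverse).map
        (fun j => PySem.List.len (pvIds l) - j)))) := by
    rw [hmem]; exact ⟨i0, rfl, hi1, hi2, hsym⟩
  cases hm : PySem.List.min? (PySem.Set.union (pvHalfMirrors (pvIds l))
      (PySem.Set.ofList ((pvHalfMirrors (pvIds l).reverse).map
        (fun j => PySem.List.len (pvIds l) - j)))) (fun x => x) with
  | none =>
    exfalso
    rw [PySem.List.min?_eq_none_iff] at hm
    rw [hm] at hi0mem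
    simp at hi0mem
  | some v =>
    have hvm := PySem.List.min?_mem hm
    have hvmin := PySem.List.min?_isMin hm
    obtain ⟨i, h1, h2, h3, h4⟩ := (hmem v).mp hvm
    have hle1 : v ≤ (i0 : Int) := hvmin _ hi0mem
    have hge : i0 ≤ i := by
      by_contra hc
      exact hmin i h2 (by omega) h4
    show v = (i0 : Int)
    omega

lemma mirrorB_of_none {α : Type} [BEq α] [LawfulBEq α] [DecidableEq α]
    (l : List α) (hnone : ∀ i : Nat, 1 ≤ i → i < l.length → ¬ pvSym l i) :
    pvMirrorB (pvIds l) = 0 := by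
  have hlen : (pvIds l).length = l.length := by
    rw [pvIds_eq_map]; simp
  have hrfl : pvMirrorB (pvIds l) =
      (match PySem.List.min? (PySem.Set.union (pvHalfMirrors (pvIds l))
        (PySem.Set.ofList ((pvHalfMirrors (pvIds l).reverse).map
          (fun j => PySem.List.len (pvIds l) - j)))) (fun x => x) with
      | some v => v
      | none => 0) := rfl
  rw [hrfl]
  cases hm : PySem.List.min? (PySem.Set.union (pvHalfMirrors (pvIds l))
      (PySem.Set.ofList ((pvHalfMirrors (pvIds l).reverse).map
        (fun j => PySem.List.len (pvIds l) - j)))) (fun x => x) with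
  | none => rfl
  | some v =>
    exfalso
    have hvm := PySem.List.min?_mem hm
    obtain ⟨i, h1, h2, h3, h4⟩ := (mem_mirrorSet (pvIds l) v).mp hvm
    rw [hlen] at h3
    rw [pvIds_eq_map] at h4
    exact hnone i h2 h3 ((pvSym_map (pvRank l) l (pvRank_inj l) i).mp h4)

-- A's horizontal search on the charlist pattern, seen on the string rows
lemma toList_inj_on (rows : List String) :
    ∀ x ∈ rows, ∀ y ∈ rows, x.toList = y.toList → x = y := by
  intro x _ y _ h
  exact String.toList_inj.mp h

lemma checkHsym_map_rev (m : List (List Char)) (i : Int) :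
    pvCheckHsym (m.map List.reverse) i = pvCheckHsym m i := by
  unfold pvCheckHsym
  simp only [PySem.List.len_eq, List.length_map]
  apply List.all_congr rfl
  intro ij
  rw [show ([] : List Char) = List.reverse [] from rfl,
      PySem.List.pyGetD_map, PySem.List.pyGetD_map]
  rw [Bool.eq_iff_iff]
  simp [List.reverse_inj]

lemma searchH_map_rev (m : List (List Char)) :
    pvSearchH (m.map List.reverse) = pvSearchH m := by
  unfold pvSearchH
  simp only [PySem.List.len_eq, List.length_map]
  rw [find?_congr_mem _ _ _ (fun x _ => checkHsym_map_rev m x)]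

-- the per-block score equivalence
lemma score_eq (rows : List String) :
    pvFlushA (rows.map String.toList) 0 = pvScoreB rows := by
  unfold pvFlushA pvScoreB
  cases hA : pvSearchH (rows.map String.toList) with
  | some h =>
    obtain ⟨i, h1, h2, h3, h4, h5⟩ := searchH_some _ h hA
    rw [List.length_map] at h3
    have hsymr : pvSym rows i :=
      (pvSym_map String.toList rows (toList_inj_on rows) i).mp h4
    have hminr : ∀ j : Nat, 1 ≤ j → j < i → ¬ pvSym rows j := by
      intro j hj1 hj2 hs
      exact h5 j hj1 hj2 ((pvSym_map String.toList rows (toList_inj_on rows) j).mpr hs)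
    have hB := mirrorB_of_least rows i h2 h3 hsymr hminr
    rw [hB, h1]
    rw [if_pos (by exact_mod_cast by omega : ((i : Int)) ≠ 0)]
    ring
  | none =>
    have hnr : ∀ i : Nat, 1 ≤ i → i < rows.length → ¬ pvSym rows i := by
      intro i hi1 hi2 hs
      exact searchH_none _ hA i hi1 (by rw [List.length_map]; exact hi2)
        ((pvSym_map String.toList rows (toList_inj_on rows) i).mpr hs)
    have hB0 := mirrorB_of_none rows hnr
    rw [hB0, if_neg (by simp)]
    -- vertical side
    unfold pvFlip90
    rw [searchH_map_rev]
    set q := pvZipStar (rows.map String.toList) with hq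
    cases hV : pvSearchH q with
    | some v =>
      obtain ⟨i, h1, h2, h3, h4, h5⟩ := searchH_some _ v hV
      rw [mirrorB_of_least q i h2 h3 h4 h5, h1]
      simp
    | none =>
      rw [mirrorB_of_none q (searchH_none _ hV)]

-- ===== VERDICT (by name: the statement is the Claim_ definition above) =====
theorem compute_spec : Claim_equal_compute := by
  intro s _
  unfold Spec_compute compute compute_alt
  rw [foldA_eq, mblocks_nil_eq, PySem.List.foldl_add (g := pvScoreB)]
  simp only [List.map_map, zero_add]
  congr 1
  apply List.map_congr_left
  intro rows _
  exact score_eq rows
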